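-- pv_equiv track=rewrite | github.com/andrasfe/war_rig | citadel/src/citadel/analysis/sequence_finder.py | _get_sequence_participants
-- ===== SOURCE A (Python) =====
-- def _get_sequence_participants(
--     sequence: list[tuple[str, str, str]],
-- ) -> list[str]:
--     """
--     Extract unique participants from a sequence in order of appearance.
--
--     Args:
--         sequence: List of (caller, callee, relationship_type) tuples.
--
--     Returns:
--         Ordered list of unique participant artifact IDs.
--     """
--     seen: set[str] = set()
--     participants: list[str] = []
--
--     for caller, callee, _ in sequence:
--         if caller not in seen:
--             seen.add(caller)
--             participants.append(caller)
--         if callee not in seen: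
--             seen.add(callee)
--             participants.append(callee)
--
--     return participants
-- ===== SOURCE B (Python) =====
-- def _get_sequence_participants(
--     sequence: list[tuple[str, str, str]],
-- ) -> list[str]:
--     """Collect the distinct participants as a set, then recover the appearance
--     order by sorting them by their first-occurrence position in the flattened
--     caller/callee stream (stream.index is injective on distinct elements, so
--     the sort order is exact)."""
--     stream = [x for caller, callee, _ in sequence for x in (caller, callee)]
--     return sorted(set(stream), key=stream.index)
-- ===== Notes on version B (the rewrite author's own statement) =====
-- stated objective: alternative
-- what changed: Replaces A's single pass with a seen-set and two membership branches by a set-then-sort algorithm: flatten the tuples into one caller/callee stream, take set(stream), and recover appearance order by sorting the distinct elements by stream.index (injective on them, so the order is exact).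
import Mathlib
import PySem

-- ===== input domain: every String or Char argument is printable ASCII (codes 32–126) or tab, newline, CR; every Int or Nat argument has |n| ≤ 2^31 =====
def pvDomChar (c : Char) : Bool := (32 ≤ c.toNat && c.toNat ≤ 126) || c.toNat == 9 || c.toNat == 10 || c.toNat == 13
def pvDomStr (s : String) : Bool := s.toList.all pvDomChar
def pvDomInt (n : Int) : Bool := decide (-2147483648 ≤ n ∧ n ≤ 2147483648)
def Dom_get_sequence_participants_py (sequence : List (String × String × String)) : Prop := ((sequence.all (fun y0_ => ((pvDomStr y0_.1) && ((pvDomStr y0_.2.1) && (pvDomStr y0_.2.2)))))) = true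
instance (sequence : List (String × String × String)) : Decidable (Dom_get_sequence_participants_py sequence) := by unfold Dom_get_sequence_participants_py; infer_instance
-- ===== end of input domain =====

-- B replaces A's one-pass seen-set loop by a set-then-sort algorithm: collect the distinct
-- participants as a set and sort them by first-occurrence index in the flattened stream
-- (the key is injective on the set, so the order is exact). Alternative structure, same result.

-- ===== PORT A =====
-- one loop step: the two 'if … not in seen' branches of A's body
def pvAStep (st : PySem.Set String × List String) (t : String × String × String) :
    PySem.Set String × List String :=
  let st1 := if st.1.contains t.1 then st else (PySem.Set.add st.1 t.1, st.2 ++ [t.1])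
  if st1.1.contains t.2.1 then st1 else (PySem.Set.add st1.1 t.2.1, st1.2 ++ [t.2.1])

def get_sequence_participants_py (sequence : List (String × String × String)) : List String :=
  (sequence.foldl pvAStep ((PySem.Set.empty : PySem.Set String), ([] : List String))).2

-- ===== PORT B =====
-- 'stream.index(x)' for x drawn from set(stream) always succeeds, so '.getD 0' is never the default;
-- the sort key is injective on the distinct elements, so sorting the set is order-exact.
def get_sequence_participants_py_alt (sequence : List (String × String × String)) : List String :=
  let stream := sequence.flatMap (fun t => [t.1, t.2.1])
  PySem.List.sorted (PySem.Set.ofList stream) (fun x => (PySem.List.index? stream x).getD 0) false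

-- ===== PRECONDITION & SPEC =====
def Spec_get_sequence_participants_py (sequence : List (String × String × String)) (out : List String) : Prop := out = get_sequence_participants_py_alt sequence
instance (sequence : List (String × String × String)) (out : List String) : Decidable (Spec_get_sequence_participants_py sequence out) := by unfold Spec_get_sequence_participants_py; infer_instance

-- ===== CLAIM (what is proved, stated in full; the proofs are below) =====
def Claim_equal_get_sequence_participants_py : Prop := ∀ (sequence : List (String × String × String)), Dom_get_sequence_participants_py sequence → Spec_get_sequence_participants_py sequence (get_sequence_participants_py sequence)

-- ===== LEMMAS AND PROOFS =====

-- first-occurrence index used as B's sort key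
def pvIdx (s : List String) (x : String) : Nat := (PySem.List.index? s x).getD 0

-- one A-step on a diagonal state is two Set.adds, staying diagonal
theorem pvAStep_diag (s : PySem.Set String) (t : String × String × String) :
    pvAStep (s, s) t =
      (PySem.Set.add (PySem.Set.add s t.1) t.2.1,
       PySem.Set.add (PySem.Set.add s t.1) t.2.1) := by
  simp only [pvAStep, PySem.Set.add]
  split_ifs <;> simp_all

-- A's loop from a diagonal state equals Set.update with the flattened stream
theorem pvA_loop_eq_update (sequence : List (String × String × String)) (s : PySem.Set String) :
    sequence.foldl pvAStep (s, s) =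
      (PySem.Set.update s (sequence.flatMap (fun t => [t.1, t.2.1])),
       PySem.Set.update s (sequence.flatMap (fun t => [t.1, t.2.1]))) := by
  induction sequence generalizing s with
  | nil => simp [PySem.Set.update]
  | cons t ts ih =>
      simp only [List.foldl_cons, pvAStep_diag, List.flatMap_cons, ih]
      simp [PySem.Set.update_cons]

theorem pvIdx_head (x : String) (t : List String) : pvIdx (x :: t) x = 0 := by
  simp [pvIdx, PySem.List.index?, List.idxOf?, List.findIdx?_cons]

theorem pvIdx_cons_ne (x b : String) (t : List String) (hne : b ≠ x) (hmem : b ∈ t) :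
    pvIdx (x :: t) b = pvIdx t b + 1 := by
  obtain ⟨n, hn⟩ := Option.isSome_iff_exists.mp ((List.isSome_idxOf?).mpr hmem)
  rw [List.idxOf?] at hn
  simp [pvIdx, PySem.List.index?, List.idxOf?, List.findIdx?_cons, hne.symm, hn]

-- along set(stream) (first-occurrence order) the first-occurrence index strictly increases
theorem pvOfList_pairwise (s : List String) :
    (PySem.Set.ofList s).Pairwise (fun a b => pvIdx s a < pvIdx s b) := by
  induction s with
  | nil => simp [PySem.Set.ofList]
  | cons x t ih =>
      rw [PySem.Set.ofList_cons]
      constructor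
      · intro b hb
        obtain ⟨hbs, hbx⟩ := (PySem.Set.mem_discard _ _ _).mp hb
        rw [pvIdx_head, pvIdx_cons_ne x b t hbx ((PySem.Set.mem_ofList t b).mp hbs)]
        omega
      · have hf : (PySem.Set.discard (PySem.Set.ofList t) x).Pairwise
            (fun a b => pvIdx t a < pvIdx t b) := List.Pairwise.filter _ ih
        refine hf.imp_of_mem ?_
        intro a b ha hb hlt
        obtain ⟨has, hax⟩ := (PySem.Set.mem_discard _ _ _).mp ha
        obtain ⟨hbs, hbx⟩ := (PySem.Set.mem_discard _ _ _).mp hb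
        rw [pvIdx_cons_ne x a t hax ((PySem.Set.mem_ofList t a).mp has),
            pvIdx_cons_ne x b t hbx ((PySem.Set.mem_ofList t b).mp hbs)]
        omega

-- ===== VERDICT (by name: the statement is the Claim_ definition above) =====
theorem get_sequence_participants_py_spec : Claim_equal_get_sequence_participants_py := by
  intro sequence _
  unfold Spec_get_sequence_participants_py get_sequence_participants_py get_sequence_participants_py_alt
  rw [show (PySem.Set.empty : PySem.Set String) = ([] : List String) from rfl] at *
  rw [pvA_loop_eq_update, PySem.Set.update_nil_left]
  exact (PySem.List.sorted_eq_self_of_pairwise _ _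
    ((pvOfList_pairwise _).imp (fun h => Nat.le_of_lt h))).symm
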